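-- pv_equiv track=rewrite | github.com/consultant-1379/utilities | PROCEDURES/SWM/tools/2.0/helper/tcg/lib/python2.7/tcg/AMFTools.py | compCategoryNotInRange
-- ===== SOURCE A (Python) =====
-- def compCategoryNotInRange(category, categoryMasks):
--     """
--     Return True if category is not in range categoryMasks.
--
--     category is a component category value, it can be an integer value,
--     or a str which will be convert to integer.
--     categoryMasks is a list of expected component category.
--
--     Examples:
--       if:
--       category = SA_AMF_COMP_LOCAL
--       categoryMasks = [SA_AMF_COMP_PROXIED, SA_AMF_COMP_PROXIED_NPI]
--       compCategoryNotInRange(category, categoryMasks) will return True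
--       if:
--       category = SA_AMF_COMP_LOCAL | SA_AMF_COMP_PROXIED_NPI
--       categoryMasks = [SA_AMF_COMP_PROXIED, SA_AMF_COMP_PROXIED_NPI]
--       compCategoryNotInRange(category, categoryMasks) will return False
--     """
--     cat = category
--     if type(category) is str:
--         cat = int(category)
--     r = 0
--     for c in categoryMasks:
--         r = r | c
--     return (cat ^ r) == (cat | r)
-- ===== SOURCE B (Python) =====
-- def compCategoryNotInRange(category, categoryMasks):
--     """Return True if category shares no bits with any mask in categoryMasks."""
--     cat = category
--     if type(category) is str:
--         cat = int(category)
--     return all((cat & c) == 0 for c in categoryMasks)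
-- ===== Notes on version B (the rewrite author's own statement) =====
-- stated objective: simpler
-- what changed: Instead of folding all masks into one OR-accumulator and testing (cat ^ r) == (cat | r), B tests each mask independently with all((cat & c) == 0 ...), dropping the running accumulator and short-circuiting on the first overlapping mask.
import Mathlib
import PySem

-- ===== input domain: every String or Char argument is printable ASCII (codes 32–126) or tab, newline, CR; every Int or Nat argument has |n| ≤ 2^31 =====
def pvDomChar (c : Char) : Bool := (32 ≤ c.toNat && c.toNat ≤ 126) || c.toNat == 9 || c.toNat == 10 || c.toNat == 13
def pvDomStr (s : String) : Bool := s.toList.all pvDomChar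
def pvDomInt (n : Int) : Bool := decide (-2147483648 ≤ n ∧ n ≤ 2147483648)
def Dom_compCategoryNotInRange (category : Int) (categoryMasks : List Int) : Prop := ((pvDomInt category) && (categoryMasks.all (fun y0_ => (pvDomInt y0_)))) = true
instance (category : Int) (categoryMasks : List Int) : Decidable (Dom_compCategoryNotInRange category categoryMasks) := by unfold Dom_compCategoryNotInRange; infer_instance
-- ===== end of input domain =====

-- B replaces A's fold-all-masks-into-one-OR-then-compare (cat ^ r) == (cat | r) by an
-- independent per-mask overlap test all((cat & c) == 0), which is simpler and short-circuits.


-- ===== PORT A =====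
-- Python A: `type(category) is str` is False for an int argument, so `cat = category`;
-- then r = OR-fold of the masks and the result is (cat ^ r) == (cat | r).
def compCategoryNotInRange (category : Int) (categoryMasks : List Int) : Bool :=
  let cat := category
  let r := categoryMasks.foldl (fun r c => PySem.Int.bor r c) 0
  PySem.Int.bxor cat r == PySem.Int.bor cat r

-- ===== PORT B =====
-- Python B: all((cat & c) == 0 for c in categoryMasks)  (short-circuiting per-mask test)
def compCategoryNotInRange_alt (category : Int) (categoryMasks : List Int) : Bool :=
  categoryMasks.all (fun c => PySem.Int.band category c == 0)

-- ===== PRECONDITION & SPEC =====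
def Spec_compCategoryNotInRange (category : Int) (categoryMasks : List Int) (out : Bool) : Prop := out = compCategoryNotInRange_alt category categoryMasks
instance (category : Int) (categoryMasks : List Int) (out : Bool) : Decidable (Spec_compCategoryNotInRange category categoryMasks out) := by unfold Spec_compCategoryNotInRange; infer_instance

-- ===== CLAIM (what is proved, stated in full; the proofs are below) =====
def Claim_equal_compCategoryNotInRange : Prop := ∀ (category : Int) (categoryMasks : List Int), Dom_compCategoryNotInRange category categoryMasks → Spec_compCategoryNotInRange category categoryMasks (compCategoryNotInRange category categoryMasks)

-- ===== LEMMAS AND PROOFS =====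

-- The bit of a Python int at position i (infinite two's complement).
def pyBit (a : Int) (i : Nat) : Bool :=
  if 0 ≤ a then a.toNat.testBit i else !((-a - 1).toNat.testBit i)

theorem pyBit_zero (i : Nat) : pyBit 0 i = false := by simp [pyBit]

theorem pyBit_natCast (n : Nat) (i : Nat) : pyBit (n : Int) i = n.testBit i := by
  simp [pyBit]

theorem pyBit_negCast (n : Nat) (i : Nat) : pyBit (-(n : Int) - 1) i = !(n.testBit i) := by
  unfold pyBit
  rw [if_neg (by omega)]
  have h : (-(-(n : Int) - 1) - 1) = (n : Int) := by ring
  rw [h, Int.toNat_natCast]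

-- x - (x &&& y) = x.ldiff y on Nat.
theorem ldiff_add_and (x y : Nat) : x.ldiff y + (x &&& y) = x := by
  induction x using Nat.binaryRec generalizing y with
  | zero =>
    simp [Nat.ldiff, Nat.bitwise_zero_left]
  | bit a m ih =>
    cases y using Nat.bitCasesOn with
    | bit b n =>
      rw [Nat.ldiff_bit, Nat.land_bit]
      have hb : (a && !b).toNat + (a && b).toNat = a.toNat := by cases a <;> cases b <;> rfl
      have h2 := ih n
      simp only [Nat.bit_val]
      omega

theorem sub_and_eq_ldiff (x y : Nat) : x - (x &&& y) = x.ldiff y := by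
  have := ldiff_add_and x y
  omega

theorem pyBit_band (a b : Int) (i : Nat) :
    pyBit (PySem.Int.band a b) i = (pyBit a i && pyBit b i) := by
  by_cases ha : 0 ≤ a <;> by_cases hb : 0 ≤ b <;>
    simp only [PySem.Int.band, if_pos, if_neg, ha, hb, if_true, if_false]
  · rw [pyBit_natCast, Nat.testBit_and]
    simp [pyBit, ha, hb]
  · rw [sub_and_eq_ldiff, pyBit_natCast, Nat.testBit_ldiff]
    simp [pyBit, ha, hb]
  · rw [sub_and_eq_ldiff, pyBit_natCast, Nat.testBit_ldiff]
    simp [pyBit, ha, hb, Bool.and_comm, Bool.or_comm, Bool.xor_comm]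
  · rw [pyBit_negCast, Nat.testBit_lor]
    simp [pyBit, ha, hb]

theorem pyBit_bor (a b : Int) (i : Nat) :
    pyBit (PySem.Int.bor a b) i = (pyBit a i || pyBit b i) := by
  by_cases ha : 0 ≤ a <;> by_cases hb : 0 ≤ b <;>
    simp only [PySem.Int.bor, if_pos, if_neg, ha, hb, if_true, if_false]
  · rw [pyBit_natCast, Nat.testBit_lor]
    simp [pyBit, ha, hb]
  · rw [sub_and_eq_ldiff, pyBit_negCast, Nat.testBit_ldiff]
    simp [pyBit, ha, hb, Bool.and_comm, Bool.or_comm, Bool.xor_comm]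
  · rw [sub_and_eq_ldiff, pyBit_negCast, Nat.testBit_ldiff]
    simp [pyBit, ha, hb, Bool.and_comm, Bool.or_comm, Bool.xor_comm]
  · rw [pyBit_negCast, Nat.testBit_and]
    simp [pyBit, ha, hb]

theorem pyBit_bxor (a b : Int) (i : Nat) :
    pyBit (PySem.Int.bxor a b) i = xor (pyBit a i) (pyBit b i) := by
  by_cases ha : 0 ≤ a <;> by_cases hb : 0 ≤ b <;>
    simp only [PySem.Int.bxor, if_pos, if_neg, ha, hb, if_true, if_false]
  · rw [pyBit_natCast, Nat.testBit_xor]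
    simp [pyBit, ha, hb]
  · rw [pyBit_negCast, Nat.testBit_xor]
    simp [pyBit, ha, hb, Bool.and_comm, Bool.or_comm, Bool.xor_comm]
  · rw [pyBit_negCast, Nat.testBit_xor]
    simp [pyBit, ha, hb, Bool.and_comm, Bool.or_comm, Bool.xor_comm]
  · rw [pyBit_natCast, Nat.testBit_xor]
    simp [pyBit, ha, hb, Bool.and_comm, Bool.or_comm, Bool.xor_comm]

theorem testBit_high (n i : Nat) (h : n ≤ i) : n.testBit i = false :=
  Nat.testBit_eq_false_of_lt (Nat.lt_of_le_of_lt h Nat.lt_two_pow_self)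

theorem pyBit_ext {a b : Int} (h : ∀ i, pyBit a i = pyBit b i) : a = b := by
  by_cases ha : 0 ≤ a <;> by_cases hb : 0 ≤ b
  · have : a.toNat = b.toNat := by
      apply Nat.eq_of_testBit_eq
      intro i
      have := h i
      simpa [pyBit, ha, hb] using this
    omega
  · exfalso
    have hi : a.toNat.testBit (a.toNat + (-b - 1).toNat)
        = !((-b - 1).toNat.testBit (a.toNat + (-b - 1).toNat)) := by
      have := h (a.toNat + (-b - 1).toNat)
      unfold pyBit at this
      rwa [if_pos ha, if_neg hb] at this
    rw [testBit_high _ _ (by omega), testBit_high _ _ (by omega)] at hi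
    simp at hi
  · exfalso
    have hi : (!((-a - 1).toNat.testBit ((-a - 1).toNat + b.toNat)))
        = b.toNat.testBit ((-a - 1).toNat + b.toNat) := by
      have := h ((-a - 1).toNat + b.toNat)
      unfold pyBit at this
      rwa [if_neg ha, if_pos hb] at this
    rw [testBit_high _ _ (by omega), testBit_high _ _ (by omega)] at hi
    simp at hi
  · have : (-a - 1).toNat = (-b - 1).toNat := by
      apply Nat.eq_of_testBit_eq
      intro i
      have := h i
      simpa [pyBit, ha, hb] using this
    omega

theorem band_eq_zero_iff (a b : Int) :
    PySem.Int.band a b = 0 ↔ ∀ i, (pyBit a i && pyBit b i) = false := by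
  constructor
  · intro h i
    rw [← pyBit_band, h, pyBit_zero]
  · intro h
    apply pyBit_ext
    intro i
    rw [pyBit_band, h, pyBit_zero]

-- (cat ^ r) == (cat | r)  ⟺  cat and r share no bit.
theorem bxor_eq_bor_iff (a r : Int) :
    PySem.Int.bxor a r = PySem.Int.bor a r ↔ PySem.Int.band a r = 0 := by
  rw [band_eq_zero_iff]
  constructor
  · intro h i
    have := congrArg (fun z => pyBit z i) h
    simp only [pyBit_bxor, pyBit_bor] at this
    revert this
    cases pyBit a i <;> cases pyBit r i <;> decide
  · intro h
    apply pyBit_ext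
    intro i
    rw [pyBit_bxor, pyBit_bor]
    have := h i
    revert this
    cases pyBit a i <;> cases pyBit r i <;> decide

theorem band_bor_eq_zero (a b c : Int) :
    PySem.Int.band a (PySem.Int.bor b c) = 0 ↔
      PySem.Int.band a b = 0 ∧ PySem.Int.band a c = 0 := by
  rw [band_eq_zero_iff, band_eq_zero_iff, band_eq_zero_iff]
  constructor
  · intro h
    refine ⟨fun i => ?_, fun i => ?_⟩ <;>
      · have := h i
        rw [pyBit_bor] at this
        revert this
        cases pyBit a i <;> cases pyBit b i <;> cases pyBit c i <;> decide
  · intro ⟨h1, h2⟩ i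
    rw [pyBit_bor]
    have := h1 i; have := h2 i
    revert ‹(pyBit a i && pyBit b i) = false› ‹(pyBit a i && pyBit c i) = false›
    cases pyBit a i <;> cases pyBit b i <;> cases pyBit c i <;> decide

theorem band_foldl_bor (cat : Int) (l : List Int) (acc : Int) :
    PySem.Int.band cat (l.foldl (fun r c => PySem.Int.bor r c) acc) = 0 ↔
      PySem.Int.band cat acc = 0 ∧ ∀ c ∈ l, PySem.Int.band cat c = 0 := by
  induction l generalizing acc with
  | nil => simp
  | cons x xs ih =>
    simp only [List.foldl_cons, ih, band_bor_eq_zero, List.mem_cons]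
    constructor
    · rintro ⟨⟨h1, h2⟩, h3⟩
      exact ⟨h1, fun c hc => hc.elim (fun e => e ▸ h2) (h3 c)⟩
    · rintro ⟨h1, h2⟩
      exact ⟨⟨h1, h2 x (Or.inl rfl)⟩, fun c hc => h2 c (Or.inr hc)⟩

-- ===== VERDICT (by name: the statement is the Claim_ definition above) =====
theorem compCategoryNotInRange_spec : Claim_equal_compCategoryNotInRange := by
  intro category categoryMasks _dom
  unfold Spec_compCategoryNotInRange compCategoryNotInRange compCategoryNotInRange_alt
  rw [Bool.eq_iff_iff]
  simp only [beq_iff_eq, List.all_eq_true]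
  rw [bxor_eq_bor_iff, band_foldl_bor]
  simp
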